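-- pv_equiv track=rewrite | github.com/inciydin/metro-time-scheduling | app.py | divide_items_into_groups
-- ===== SOURCE A (Python) =====
-- def divide_items_into_groups(total_items):
--     group_count = 3
--     base_group_size = total_items // group_count
--     remainder = total_items % group_count
--     groups = [base_group_size] * group_count
--
--     for i in range(remainder):
--         groups[i] += 1
--
--     return {"0": groups[0], "20": groups[1], "40": groups[2]}
-- ===== SOURCE B (Python) =====
-- def divide_items_into_groups(total_items):
--     return {label: (total_items + 2 - i) // 3
--             for i, label in enumerate(("0", "20", "40"))}
-- ===== Notes on version B (the rewrite author's own statement) =====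
-- stated objective: simpler
-- what changed: Replaced the base/remainder split plus remainder-distributing loop with a closed-form floor division (total_items + 2 - i) // 3 per group.
import Mathlib
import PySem

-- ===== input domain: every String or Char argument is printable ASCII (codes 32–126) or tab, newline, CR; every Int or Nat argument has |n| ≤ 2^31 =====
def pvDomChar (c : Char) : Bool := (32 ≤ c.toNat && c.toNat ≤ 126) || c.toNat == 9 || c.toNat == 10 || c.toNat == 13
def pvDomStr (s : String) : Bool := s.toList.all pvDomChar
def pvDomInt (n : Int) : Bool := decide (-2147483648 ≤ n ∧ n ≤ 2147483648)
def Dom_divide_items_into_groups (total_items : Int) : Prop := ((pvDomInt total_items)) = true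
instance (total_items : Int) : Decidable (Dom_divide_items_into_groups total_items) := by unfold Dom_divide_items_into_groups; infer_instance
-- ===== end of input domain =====

-- B replaces the base/remainder loop with a closed-form floor division per group (simpler).


-- ===== PORT A =====
-- groups[i] += 1 : i ranges over range(remainder) with 0 ≤ remainder ≤ 2, always in range,
-- so List.set/getD on i.toNat is exact here.
def divide_items_into_groups (total_items : Int) : List (String × Int) :=
  let group_count : Int := 3
  let base_group_size := PySem.Int.floordiv total_items group_count
  let remainder := PySem.Int.mod total_items group_count
  let groups : List Int := [base_group_size, base_group_size, base_group_size]
  let groups := (PySem.List.pyRange 0 remainder 1).foldl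
    (fun g i => g.set i.toNat (g.getD i.toNat 0 + 1)) groups
  [("0", groups.getD 0 0), ("20", groups.getD 1 0), ("40", groups.getD 2 0)]

-- ===== PORT B =====
def divide_items_into_groups_alt (total_items : Int) : List (String × Int) :=
  (PySem.List.enumerate ["0", "20", "40"]).map
    (fun p => (p.2, PySem.Int.floordiv (total_items + 2 - p.1) 3))

-- ===== PRECONDITION & SPEC =====
def Spec_divide_items_into_groups (total_items : Int) (out : List (String × Int)) : Prop := out = divide_items_into_groups_alt total_items
instance (total_items : Int) (out : List (String × Int)) : Decidable (Spec_divide_items_into_groups total_items out) := by unfold Spec_divide_items_into_groups; infer_instance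

-- ===== CLAIM (what is proved, stated in full; the proofs are below) =====
def Claim_equal_divide_items_into_groups : Prop := ∀ (total_items : Int), Dom_divide_items_into_groups total_items → Spec_divide_items_into_groups total_items (divide_items_into_groups total_items)

-- ===== LEMMAS AND PROOFS =====

theorem pv_closed_form (t : Int) (j : Int) (hj : j = 0 ∨ j = 1 ∨ j = 2) :
    PySem.Int.floordiv (t + 2 - j) 3 = t / 3 + (if j < t % 3 then 1 else 0) := by
  rw [PySem.Int.floordiv_eq_ediv_of_pos (a := t + 2 - j) (b := 3) (by norm_num)]
  split_ifs with h <;> omega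

-- ===== VERDICT (by name: the statement is the Claim_ definition above) =====
theorem divide_items_into_groups_spec : Claim_equal_divide_items_into_groups := by
  intro t _
  show _ = _
  have h0 := pv_closed_form t 0 (by omega)
  have h1 := pv_closed_form t 1 (by omega)
  have h2 := pv_closed_form t 2 (by omega)
  unfold divide_items_into_groups divide_items_into_groups_alt
  rcases (show t % 3 = 0 ∨ t % 3 = 1 ∨ t % 3 = 2 by omega) with h | h | h <;>
    rw [h] at h0 h1 h2 <;> norm_num at h0 h1 h2 <;>
    simp [PySem.List.pyRange, PySem.List.enumerate, List.range_succ, List.getD, h, h0, h1, h2]
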